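-- pv_equiv track=rewrite | github.com/ynsong/Introduction-to-Computer-Science | a07/a07q4.py | max_times
-- ===== SOURCE A (Python) =====
-- def max_times(L):
--     max_val = L[0][0]
--     times = 0
--     for i in L:
--         for j in i:
--             if j > max_val:
--                 max_val = j
--                 times = 1
--             elif j == max_val:
--                 times += 1
--     max_lst = [max_val,times]
--     return max_lst
-- ===== SOURCE B (Python) =====
-- def max_times(L):
--     flat = [x for row in L for x in row]
--     m = max(flat)
--     return [m, flat.count(m)]
-- ===== Notes on version B (the rewrite author's own statement) =====
-- stated objective: simpler
-- what changed: Replaces A's single fused nested loop that maintains the running max and its count together with a flatten-then-max-then-count decomposition (flatten once, take max, count occurrences with list.count).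
-- crash fix: On inputs whose first row is empty but some later row is non-empty (e.g. [[],[3]]), A raises IndexError at L[0][0] while B returns the max/count of the remaining elements. — e.g. on max_times([[], [3]]): A raises IndexError, B returns [3, 1]
import Mathlib
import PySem

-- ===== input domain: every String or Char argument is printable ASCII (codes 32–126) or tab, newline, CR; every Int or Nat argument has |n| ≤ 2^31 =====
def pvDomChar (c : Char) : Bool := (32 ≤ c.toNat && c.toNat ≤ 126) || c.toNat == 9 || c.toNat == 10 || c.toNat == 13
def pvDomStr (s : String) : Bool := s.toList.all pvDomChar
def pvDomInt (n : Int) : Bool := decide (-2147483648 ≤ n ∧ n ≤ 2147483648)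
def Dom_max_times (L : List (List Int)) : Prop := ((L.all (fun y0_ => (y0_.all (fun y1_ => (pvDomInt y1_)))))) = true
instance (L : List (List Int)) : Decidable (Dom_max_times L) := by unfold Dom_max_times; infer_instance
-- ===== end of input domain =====

-- B is a simpler two-step decomposition (flatten, max, count) instead of A's fused loop.

-- ===== PORT A =====
def max_times (L : List (List Int)) : List Int :=
  match (PySem.List.pyGet? L 0).bind (fun r => PySem.List.pyGet? r 0) with
  | none => []  -- Python raises IndexError here (excluded by Pre_)
  | some v =>
    let s := L.foldl (fun (s : Int × Int) i =>
      i.foldl (fun (s : Int × Int) j =>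
        if j > s.1 then (j, 1) else if j = s.1 then (s.1, s.2 + 1) else s) s) (v, 0)
    [s.1, s.2]

-- ===== PORT B =====
def max_times_alt (L : List (List Int)) : List Int :=
  let flat := L.flatMap (fun row => row)
  match PySem.List.max? flat (fun x => x) with
  | none => []  -- Python max raises ValueError here (excluded by Pre_)
  | some m => [m, (PySem.List.count flat m : Int)]

-- ===== PRECONDITION & SPEC =====
-- Pre_ excludes exactly the inputs where A raises IndexError at L[0][0]: empty L or empty first row.
def Pre_max_times (L : List (List Int)) : Prop := L ≠ [] ∧ L.headD [] ≠ []
instance (L : List (List Int)) : Decidable (Pre_max_times L) := by unfold Pre_max_times; infer_instance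
def pvWitness_max_times : List (List Int) := [[1, 3], [3, 2]]

-- On inputs whose first row is empty but some later row is non-empty, A raises IndexError at L[0][0]
-- while B returns the max/count of the remaining elements.
def Raises_max_times (L : List (List Int)) : Prop := L ≠ [] ∧ L.headD [] = [] ∧ L.flatten ≠ []
instance (L : List (List Int)) : Decidable (Raises_max_times L) := by unfold Raises_max_times; infer_instance
def pvRaiseWitness_max_times : List (List Int) := [[], [3]]
def pvRaiseWitnessOut_max_times : List Int := [3, 1]

def Spec_max_times (L : List (List Int)) (out : List Int) : Prop := out = max_times_alt L
instance (L : List (List Int)) (out : List Int) : Decidable (Spec_max_times L out) := by unfold Spec_max_times; infer_instance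

-- ===== CLAIM (what is proved, stated in full; the proofs are below) =====
def Claim_equal_max_times : Prop := ∀ (L : List (List Int)), Dom_max_times L → Pre_max_times L → Spec_max_times L (max_times L)
def Claim_raises_max_times : Prop := (∀ (L : List (List Int)), Dom_max_times L → Raises_max_times L → ¬ Pre_max_times L) ∧ (Dom_max_times (pvRaiseWitness_max_times) ∧ Raises_max_times (pvRaiseWitness_max_times) ∧ max_times_alt (pvRaiseWitness_max_times) = pvRaiseWitnessOut_max_times)

-- ===== LEMMAS AND PROOFS =====

theorem le_foldl_max_int : ∀ (xs : List Int) (m : Int), m ≤ xs.foldl max m := by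
  intro xs
  induction xs with
  | nil => intro m; simp
  | cons x xs ih =>
    intro m
    calc m ≤ max m x := le_max_left _ _
    _ ≤ xs.foldl max (max m x) := ih _

-- A's inner loop body over the flattened element list, characterised.
theorem loopA : ∀ (xs : List Int) (m t : Int),
    xs.foldl (fun (s : Int × Int) j =>
        if j > s.1 then (j, 1) else if j = s.1 then (s.1, s.2 + 1) else s) (m, t)
      = (xs.foldl max m,
         (if xs.foldl max m = m then t else 0) + (xs.count (xs.foldl max m) : Int)) := by
  intro xs
  induction xs with
  | nil => intro m t; simp
  | cons x xs ih =>
    intro m t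
    simp only [List.foldl_cons, List.count_cons, beq_iff_eq]
    by_cases hgt : x > m
    · have hmx : max m x = x := max_eq_right (le_of_lt hgt)
      rw [if_pos hgt, ih]
      simp only [hmx]
      have hMx : x ≤ List.foldl max x xs := le_foldl_max_int xs x
      simp only [Prod.mk.injEq]
      refine ⟨by trivial, ?_⟩
      push_cast
      split_ifs <;> omega
    · rw [if_neg hgt]
      have hmx : max m x = m := max_eq_left (by omega)
      have hMm : m ≤ List.foldl max m xs := le_foldl_max_int xs m
      by_cases heq : x = m
      · rw [if_pos heq, ih]
        simp only [hmx, Prod.mk.injEq]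
        refine ⟨by trivial, ?_⟩
        push_cast
        split_ifs <;> omega
      · rw [if_neg heq, ih]
        simp only [hmx, Prod.mk.injEq]
        refine ⟨by trivial, ?_⟩
        have hlt : x < m := by omega
        push_cast
        split_ifs <;> omega

theorem foldl_nested_eq_flatten (f : Int × Int → Int → Int × Int) :
    ∀ (L : List (List Int)) (init : Int × Int),
      L.foldl (fun s i => i.foldl f s) init = L.flatten.foldl f init := by
  intro L
  induction L with
  | nil => intro init; simp
  | cons r L ih => intro init; simp [List.foldl_append, ih]

-- ===== VERDICT (by name: the statement is the Claim_ definition above) =====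
theorem max_times_spec : Claim_equal_max_times := by
  intro L _ hpre
  obtain ⟨h1, h2⟩ := hpre
  obtain ⟨r, rest, rfl⟩ : ∃ r rest, L = r :: rest := by
    cases L with
    | nil => exact absurd rfl h1
    | cons r rest => exact ⟨r, rest, rfl⟩
  obtain ⟨x, xs, rfl⟩ : ∃ x xs, r = x :: xs := by
    cases r with
    | nil => simp at h2
    | cons x xs => exact ⟨x, xs, rfl⟩
  unfold Spec_max_times max_times max_times_alt
  rw [show (PySem.List.pyGet? ((x :: xs) :: rest) 0).bind
        (fun r => PySem.List.pyGet? r 0) = some x from by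
      rw [PySem.List.pyGet?_zero_cons, Option.bind_some, PySem.List.pyGet?_zero_cons]]
  dsimp only
  rw [foldl_nested_eq_flatten]
  have hflat : ((x :: xs) :: rest).flatten = x :: (xs ++ rest.flatten) := by simp
  have hflatMap : ((x :: xs) :: rest).flatMap (fun row => row) = x :: (xs ++ rest.flatten) := by
    simp [List.flatMap]
  rw [hflat, hflatMap, PySem.List.max?_id_cons, List.foldl_cons]
  rw [show (if x > x then ((x : Int), (1 : Int)) else if x = x then (x, 0 + 1) else (x, 0)) = (x, 1) from by norm_num]
  rw [loopA]
  have hxM : x ≤ List.foldl max x (xs ++ rest.flatten) := le_foldl_max_int _ x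
  simp only [PySem.List.count_eq, List.count_cons, beq_iff_eq, List.cons.injEq]
  refine ⟨by trivial, ?_, by trivial⟩
  push_cast
  split_ifs <;> omega

@[simp] theorem max_times_raises : Claim_raises_max_times := by
  unfold Claim_raises_max_times
  constructor
  · intro L _ hr hp
    exact hp.2 hr.2.1
  · exact ⟨by decide, by decide, by decide⟩
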